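-- pv_equiv track=rewrite | github.com/adhithyan15/coding-adventures | code/packages/python/aztec-code/src/aztec_code/__init__.py | _gf16_rs_encode
-- ===== SOURCE A (Python) =====
-- from typing import Final
--
-- _LOG16: Final[tuple[int, ...]] = (
--     -1,  # log(0) = undefined
--     0,   # log(1) = 0
--     1,   # log(2) = 1
--     4,   # log(3) = 4
--     2,   # log(4) = 2
--     8,   # log(5) = 8
--     5,   # log(6) = 5
--     10,  # log(7) = 10
--     3,   # log(8) = 3
--     14,  # log(9) = 14
--     9,   # log(10) = 9
--     7,   # log(11) = 7
--     6,   # log(12) = 6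
--     13,  # log(13) = 13
--     11,  # log(14) = 11
--     12,  # log(15) = 12
-- )
--
-- _ALOG16: Final[tuple[int, ...]] = (
--     1, 2, 4, 8, 3, 6, 12, 11, 5, 10, 7, 14, 15, 13, 9, 1,
-- )
--
-- def _gf16_mul(a: int, b: int) -> int:
--     """Multiply two GF(16) elements.
--
--     Uses log/antilog: ``a * b = ALOG16[(LOG16[a] + LOG16[b]) mod 15]``.
--     Returns 0 if either operand is 0.
--     """
--     if a == 0 or b == 0:
--         return 0
--     return _ALOG16[(_LOG16[a] + _LOG16[b]) % 15]
--
-- def _build_gf16_generator(n: int) -> list[int]: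
--     """Build the GF(16) RS generator polynomial with roots ``alpha^1..alpha^n``.
--
--     Returns ``[g_0, g_1, ..., g_n]`` where ``g_n = 1`` (monic).
--
--     The polynomial is built incrementally by multiplying ``(x - alpha^i)``
--     one factor at a time, using XOR for addition since GF(16) is
--     characteristic-2.
--     """
--     g: list[int] = [1]
--     for i in range(1, n + 1):
--         ai = _ALOG16[i % 15]
--         nxt: list[int] = [0] * (len(g) + 1)
--         for j in range(len(g)):
--             nxt[j + 1] ^= g[j]
--             nxt[j] ^= _gf16_mul(ai, g[j])
--         g = nxt
--     return g
--
-- def _gf16_rs_encode(data: list[int], n: int) -> list[int]: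
--     """Compute ``n`` GF(16) RS check nibbles for the given data nibbles.
--
--     Uses the LFSR polynomial-division algorithm — the same shape as the
--     classic CRC computation but in GF(16) arithmetic.
--     """
--     g = _build_gf16_generator(n)
--     rem: list[int] = [0] * n
--     for nibble in data:
--         fb = nibble ^ rem[0]
--         for i in range(n - 1):
--             rem[i] = rem[i + 1] ^ _gf16_mul(g[i + 1], fb)
--         rem[n - 1] = _gf16_mul(g[n], fb)
--     return rem
-- ===== SOURCE B (Python) =====
-- from typing import Final
--
-- _LOG16: Final[tuple[int, ...]] = (
--     -1, 0, 1, 4, 2, 8, 5, 10, 3, 14, 9, 7, 6, 13, 11, 12,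
-- )
--
-- _ALOG16: Final[tuple[int, ...]] = (
--     1, 2, 4, 8, 3, 6, 12, 11, 5, 10, 7, 14, 15, 13, 9, 1,
-- )
--
-- def _gf16_mul(a: int, b: int) -> int:
--     if a == 0 or b == 0:
--         return 0
--     return _ALOG16[(_LOG16[a] + _LOG16[b]) % 15]
--
-- def _build_gf16_generator(n: int) -> list[int]:
--     g: list[int] = [1]
--     for i in range(1, n + 1):
--         ai = _ALOG16[i % 15]
--         nxt: list[int] = [0] * (len(g) + 1)
--         for j in range(len(g)):
--             nxt[j + 1] ^= g[j]
--             nxt[j] ^= _gf16_mul(ai, g[j])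
--         g = nxt
--     return g
--
-- def _gf16_rs_encode(data: list[int], n: int) -> list[int]:
--     """Systematic long division: append n zero nibbles and reduce the
--     message head-first by the generator; what is left is the remainder."""
--     g = _build_gf16_generator(n)
--     buf = list(data) + [0] * n
--     for _ in data:
--         coef, rest = buf[0], buf[1:]
--         buf = [x ^ _gf16_mul(g[j + 1], coef) for j, x in enumerate(rest[:n])] + rest[n:]
--     return buf
-- ===== Notes on version B (the rewrite author's own statement) =====
-- stated objective: alternative
-- what changed: The LFSR shift-register recurrence (a fixed-size register updated in place per nibble) is replaced by explicit systematic polynomial long division: the message is padded with n zero nibbles and reduced head-first by the generator, the surviving n-element tail being the remainder.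
import Mathlib
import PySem

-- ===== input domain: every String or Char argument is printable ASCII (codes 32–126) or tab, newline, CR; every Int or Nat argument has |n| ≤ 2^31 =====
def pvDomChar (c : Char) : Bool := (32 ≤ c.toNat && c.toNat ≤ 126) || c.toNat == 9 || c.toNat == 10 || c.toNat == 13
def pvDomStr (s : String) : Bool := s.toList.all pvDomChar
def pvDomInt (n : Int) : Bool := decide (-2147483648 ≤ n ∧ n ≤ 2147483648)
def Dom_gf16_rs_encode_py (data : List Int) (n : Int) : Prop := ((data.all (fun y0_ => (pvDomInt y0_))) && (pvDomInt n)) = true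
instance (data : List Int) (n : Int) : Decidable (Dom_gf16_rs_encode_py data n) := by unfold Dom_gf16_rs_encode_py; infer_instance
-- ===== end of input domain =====

-- ===== PORT A =====
-- B is an alternative decomposition of the same cost: the LFSR shift-register recurrence of A
-- is replaced by explicit systematic polynomial long division on data padded with n zeros.
def pvLog16 : List Int := [-1, 0, 1, 4, 2, 8, 5, 10, 3, 14, 9, 7, 6, 13, 11, 12]
def pvAlog16 : List Int := [1, 2, 4, 8, 3, 6, 12, 11, 5, 10, 7, 14, 15, 13, 9, 1]

def pvGf16Mul (a b : Int) : Int :=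
  if a = 0 ∨ b = 0 then 0
  else PySem.List.pyGetD pvAlog16
    (PySem.Int.mod (PySem.List.pyGetD pvLog16 a 0 + PySem.List.pyGetD pvLog16 b 0) 15) 0

def pvBuildGen (n : Int) : List Int :=
  (PySem.List.pyRange 1 (n + 1) 1).foldl (fun g i =>
    let ai := PySem.List.pyGetD pvAlog16 (PySem.Int.mod i 15) 0
    let nxt : List Int := List.replicate (g.length + 1) 0
    (PySem.List.pyRange 0 (PySem.List.len g) 1).foldl (fun nxt j =>
      let nxt := PySem.List.pySetD nxt (j + 1)
        (PySem.Int.bxor (PySem.List.pyGetD nxt (j + 1) 0) (PySem.List.pyGetD g j 0))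
      PySem.List.pySetD nxt j
        (PySem.Int.bxor (PySem.List.pyGetD nxt j 0) (pvGf16Mul ai (PySem.List.pyGetD g j 0)))) nxt)
    [1]

def pvEncStepA (g : List Int) (n : Int) (rem : List Int) (nibble : Int) : List Int :=
  let fb := PySem.Int.bxor nibble (PySem.List.pyGetD rem 0 0)
  let rem := (PySem.List.pyRange 0 (n - 1) 1).foldl (fun r i =>
    PySem.List.pySetD r i
      (PySem.Int.bxor (PySem.List.pyGetD r (i + 1) 0) (pvGf16Mul (PySem.List.pyGetD g (i + 1) 0) fb))) rem
  PySem.List.pySetD rem (n - 1) (pvGf16Mul (PySem.List.pyGetD g n 0) fb)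

def gf16_rs_encode_py (data : List Int) (n : Int) : List Int :=
  let g := pvBuildGen n
  data.foldl (pvEncStepA g n) (List.replicate n.toNat 0)

def pvEncStepB (g : List Int) (n : Int) (buf : List Int) : List Int :=
  let coef := PySem.List.pyGetD buf 0 0
  let rest := PySem.List.slice buf (some 1) none
  ((PySem.List.slice rest none (some n)).zipIdx.map
    (fun p => PySem.Int.bxor p.1 (pvGf16Mul (PySem.List.pyGetD g ((p.2 : Int) + 1) 0) coef)))
  ++ PySem.List.slice rest (some n) none

def gf16_rs_encode_py_alt (data : List Int) (n : Int) : List Int :=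
  let g := pvBuildGen n
  data.foldl (fun buf _ => pvEncStepB g n buf) (data ++ List.replicate n.toNat 0)


-- ===== PRECONDITION & SPEC =====
-- Pre_ excludes exactly the inputs on which A raises IndexError: a nonempty message with
-- n < 1 (rem[0] / rem[-1] on the empty register), or a data entry outside -16..15
-- (feedback value indexes past either end of the 16-entry log table).
def Pre_gf16_rs_encode_py (data : List Int) (n : Int) : Prop :=
  (data = [] ∨ 1 ≤ n) ∧ ∀ x ∈ data, -16 ≤ x ∧ x ≤ 15
instance (data : List Int) (n : Int) : Decidable (Pre_gf16_rs_encode_py data n) := by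
  unfold Pre_gf16_rs_encode_py; infer_instance
def pvWitness_gf16_rs_encode_py : List Int × Int := ([3, 1, 4, 15, 9, 2], 4)

def Spec_gf16_rs_encode_py (data : List Int) (n : Int) (out : List Int) : Prop := out = gf16_rs_encode_py_alt data n
instance (data : List Int) (n : Int) (out : List Int) : Decidable (Spec_gf16_rs_encode_py data n out) := by unfold Spec_gf16_rs_encode_py; infer_instance

-- ===== CLAIM (what is proved, stated in full; the proofs are below) =====
def Claim_equal_gf16_rs_encode_py : Prop := ∀ (data : List Int) (n : Int), Dom_gf16_rs_encode_py data n → Pre_gf16_rs_encode_py data n → Spec_gf16_rs_encode_py data n (gf16_rs_encode_py data n)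

-- ===== LEMMAS AND PROOFS =====

-- xor with 0 on the left is the identity
theorem pv_bxor_zero_left (a : Int) : PySem.Int.bxor 0 a = a := by
  rw [PySem.Int.bxor_comm]; exact PySem.Int.bxor_zero a

theorem pv_bxor_nonneg {a b : Int} (ha : 0 ≤ a) (hb : 0 ≤ b) : 0 ≤ PySem.Int.bxor a b := by
  rw [PySem.Int.bxor_of_nonneg ha hb]; exact Int.natCast_nonneg _

-- associativity of Python xor when the two right operands are nonnegative (all we need)
theorem pv_bxor_assoc {a b c : Int} (hb : 0 ≤ b) (hc : 0 ≤ c) :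
    PySem.Int.bxor (PySem.Int.bxor a b) c = PySem.Int.bxor a (PySem.Int.bxor b c) := by
  rcases (by omega : 0 ≤ a ∨ a < 0) with ha | ha
  · rw [PySem.Int.bxor_of_nonneg ha hb, PySem.Int.bxor_of_nonneg hb hc,
      PySem.Int.bxor_of_nonneg (Int.natCast_nonneg _) hc,
      PySem.Int.bxor_of_nonneg ha (Int.natCast_nonneg _)]
    simp [Nat.xor_assoc]
  · unfold PySem.Int.bxor
    have h1 : ¬ 0 ≤ a := by omega
    have hbc : (0:Int) ≤ (b.toNat ^^^ c.toNat : Nat) := Int.natCast_nonneg _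
    simp only [h1, if_false, hb, if_true, hc]
    have h2 : ¬ (0:Int) ≤ -(((-a - 1).toNat ^^^ b.toNat : Nat) : Int) - 1 := by
      have := Int.natCast_nonneg (((-a - 1).toNat ^^^ b.toNat : Nat)); omega
    simp only [h2, if_false, hbc, if_true]
    have h3 : (-(-(((-a - 1).toNat ^^^ b.toNat : Nat) : Int) - 1) - 1).toNat
        = ((-a - 1).toNat ^^^ b.toNat : Nat) := by omega
    have h4 : ((b.toNat ^^^ c.toNat : Nat) : Int).toNat = (b.toNat ^^^ c.toNat : Nat) := by omega
    rw [h3, h4, Nat.xor_assoc]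

theorem pv_alog_getD_nonneg (i : Int) : 0 ≤ PySem.List.pyGetD pvAlog16 i 0 := by
  by_cases h : PySem.Raise.InRange pvAlog16.length i
  · have hm := PySem.List.pyGetD_mem pvAlog16 (0 : Int) h
    have hall : ∀ x ∈ pvAlog16, (0 : Int) ≤ x := by decide
    exact hall _ hm
  · rw [PySem.List.pyGetD_of_none _ _ _ ((PySem.List.pyGet?_eq_none_iff _ _).mpr h)]

theorem pvGf16Mul_nonneg (a b : Int) : 0 ≤ pvGf16Mul a b := by
  unfold pvGf16Mul
  split
  · exact le_refl 0
  · exact pv_alog_getD_nonneg _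

-- zipWith bxor with an all-zero left/right column
theorem pv_zip_zero_left (xs : List Int) :
    List.zipWith PySem.Int.bxor (List.replicate xs.length 0) xs = xs := by
  induction xs with
  | nil => rfl
  | cons x t ih => simpa [List.replicate_succ, pv_bxor_zero_left] using ih

theorem pv_zip_zero_right (xs : List Int) :
    List.zipWith PySem.Int.bxor xs (List.replicate xs.length 0) = xs := by
  induction xs with
  | nil => rfl
  | cons x t ih => simpa [List.replicate_succ, PySem.Int.bxor_zero] using ih

-- characterization of A's inner LFSR loop as a map
theorem pv_foldA_eq (g : List Int) (fb : Int) (m : Nat) (rem : List Int) (hm : m ≤ rem.length) :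
    (List.range m).foldl (fun r k => r.set k
        (PySem.Int.bxor (r.getD (k + 1) 0) (pvGf16Mul (g.getD (k + 1) 0) fb))) rem
      = (List.range m).map (fun i =>
          PySem.Int.bxor (rem.getD (i + 1) 0) (pvGf16Mul (g.getD (i + 1) 0) fb)) ++ rem.drop m := by
  induction m with
  | zero => simp
  | succ m ih =>
    have hm' : m ≤ rem.length := by omega
    rw [List.range_succ, List.foldl_append, List.foldl_cons, List.foldl_nil, ih hm',
      List.map_append]
    set A := (List.range m).map (fun i =>
        PySem.Int.bxor (rem.getD (i + 1) 0) (pvGf16Mul (g.getD (i + 1) 0) fb)) with hA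
    have hAl : A.length = m := by simp [hA]
    have hgetD : (A ++ rem.drop m).getD (m + 1) 0 = rem.getD (m + 1) 0 := by
      simp only [List.getD]
      rw [List.getElem?_append_right (by omega)]
      rw [hAl]
      have : m + 1 - m = 1 := by omega
      rw [this, List.getElem?_drop]
    rw [hgetD]
    have hdrop : rem.drop m = rem[m] :: rem.drop (m + 1) := List.drop_eq_getElem_cons (by omega)
    rw [hdrop]
    rw [List.set_append_right _ _ (by omega)]
    rw [hAl]
    have hmm : m - m = 0 := by omega
    rw [hmm, List.set_cons_zero]
    simp

-- characterization of one A step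
theorem pv_stepA_eq (g : List Int) (n : Int) (N : Nat) (hN : 0 < N) (hn : n = (N : Int))
    (rem : List Int) (hlen : rem.length = N) (nib : Int) :
    pvEncStepA g n rem nib
      = (List.range (N - 1)).map (fun i =>
          PySem.Int.bxor (rem.getD (i + 1) 0)
            (pvGf16Mul (g.getD (i + 1) 0) (PySem.Int.bxor nib (rem.getD 0 0))))
        ++ [pvGf16Mul (g.getD N 0) (PySem.Int.bxor nib (rem.getD 0 0))] := by
  subst hn
  dsimp only [pvEncStepA]
  rw [PySem.List.pyGetD_zero]
  set fb := PySem.Int.bxor nib (rem.getD 0 0) with hfb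
  have hc1 : (N : Int) - 1 = ((N - 1 : Nat) : Int) := by omega
  rw [hc1, PySem.List.pyRange_one, List.foldl_map]
  have hcongr : ∀ (r : List Int) (k : Nat),
      PySem.List.pySetD r (0 + (k : Int))
        (PySem.Int.bxor (PySem.List.pyGetD r (0 + (k : Int) + 1) 0)
          (pvGf16Mul (PySem.List.pyGetD g (0 + (k : Int) + 1) 0) fb))
      = r.set k (PySem.Int.bxor (r.getD (k + 1) 0) (pvGf16Mul (g.getD (k + 1) 0) fb)) := by
    intro r k
    have h1 : (0 : Int) + (k : Int) + 1 = ((k + 1 : Nat) : Int) := by omega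
    have h0 : (0 : Int) + (k : Int) = ((k : Nat) : Int) := by omega
    rw [h1, h0, PySem.List.pySetD_natCast, PySem.List.pyGetD_natCast, PySem.List.pyGetD_natCast]
  simp only [hcongr]
  have hsub : (((N - 1 : Nat) : Int) - 0).toNat = N - 1 := by omega
  rw [hsub, pv_foldA_eq g fb (N - 1) rem (by omega)]
  rw [PySem.List.pySetD_natCast, PySem.List.pyGetD_natCast]
  have hdrop : rem.drop (N - 1) = rem[N - 1]'(by omega) :: rem.drop N := by
    have := List.drop_eq_getElem_cons (l := rem) (i := N - 1) (by omega)
    rw [this, (by omega : N - 1 + 1 = N)]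
  have hdropN : rem.drop N = [] := by
    apply List.drop_eq_nil_of_le
    omega
  rw [hdrop, hdropN, List.set_append_right _ _ (by simp), ]
  simp

-- characterization of one B step
theorem pv_stepB_eq (g : List Int) (n : Int) (N : Nat) (hn : n = (N : Int))
    (c : Int) (rest : List Int) :
    pvEncStepB g n (c :: rest)
      = (rest.take N).zipIdx.map (fun p =>
          PySem.Int.bxor p.1 (pvGf16Mul (g.getD (p.2 + 1) 0) c)) ++ rest.drop N := by
  subst hn
  dsimp only [pvEncStepB]
  rw [PySem.List.pyGetD_zero_cons, PySem.List.slice_from_one, List.tail_cons,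
    PySem.List.slice_to_natCast, PySem.List.slice_from_natCast]
  congr 1
  apply List.map_congr_left
  intro p _
  have h1 : ((p.2 : Int)) + 1 = ((p.2 + 1 : Nat) : Int) := by push_cast; ring
  rw [h1, PySem.List.pyGetD_natCast]

-- the heart: one long-division step on the invariant shape equals the shape for the new register
theorem pv_step_core (g : List Int) (N : Nat) (hN : 0 < N) (q rt : List Int) (fb : Int)
    (hq : N ≤ q.length) (hrt : rt.length = N - 1) (hnn : ∀ x ∈ rt, 0 ≤ x) :
    ((List.zipWith PySem.Int.bxor (q.take (N - 1)) rt ++ q.drop (N - 1)).take N).zipIdx.map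
        (fun p => PySem.Int.bxor p.1 (pvGf16Mul (g.getD (p.2 + 1) 0) fb))
      ++ (List.zipWith PySem.Int.bxor (q.take (N - 1)) rt ++ q.drop (N - 1)).drop N
    = List.zipWith PySem.Int.bxor (q.take N)
        ((List.range (N - 1)).map (fun i =>
            PySem.Int.bxor (rt.getD i 0) (pvGf16Mul (g.getD (i + 1) 0) fb))
          ++ [pvGf16Mul (g.getD N 0) fb])
      ++ q.drop N := by
  obtain ⟨M, rfl⟩ : ∃ M, N = M + 1 := ⟨N - 1, by omega⟩
  simp only [Nat.add_sub_cancel]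
  have hqM : M < q.length := by omega
  set Z := List.zipWith PySem.Int.bxor (q.take M) rt with hZdef
  have hZ : Z.length = M := by
    simp [hZdef, hrt]
    omega
  clear_value Z
  have hcons : q.drop M = q[M] :: q.drop (M + 1) := List.drop_eq_getElem_cons hqM
  -- take (M+1) of Z ++ drop
  have htake : (Z ++ q.drop M).take (M + 1) = Z ++ [q[M]] := by
    have h1 : M + 1 - M = 1 := by omega
    rw [List.take_append, List.take_of_length_le (by omega), hZ, h1, hcons]
    rfl
  have hdrop : (Z ++ q.drop M).drop (M + 1) = q.drop (M + 1) := by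
    have h1 : M + 1 - M = 1 := by omega
    rw [List.drop_append, List.drop_eq_nil_of_le (by omega), hZ, h1, hcons]
    rfl
  rw [htake, hdrop]
  -- split q.take (M+1)
  have htq : q.take (M + 1) = q.take M ++ [q[M]] := by
    rw [List.take_add_one]
    simp [List.getElem?_eq_getElem hqM]
  rw [htq, List.zipWith_append (by simp; omega)]
  -- split the zipIdx over the append
  rw [List.zipIdx_append, List.map_append, hZ]
  simp only [List.zipIdx, List.map_cons, List.map_nil]
  rw [List.append_assoc, List.append_assoc]
  congr 1
  -- main columns
  · apply List.ext_getElem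
    · simp [hZ]
      omega
    · intro k hk1 hk2
      have hkM : k < M := by
        simp only [List.length_map, List.length_zipIdx, hZ] at hk1
        exact hk1
      have hZk : Z[k]'(by omega) = PySem.Int.bxor (q[k]'(by omega)) (rt[k]'(by omega)) := by
        simp only [hZdef, List.getElem_zipWith, List.getElem_take]
      have hlen1 : k < (List.zipWith PySem.Int.bxor (q.take M)
          ((List.range M).map (fun i =>
            PySem.Int.bxor (rt.getD i 0) (pvGf16Mul (g.getD (i + 1) 0) fb)))).length := by
        simp only [List.length_zipWith, List.length_take, List.length_map, List.length_range]
        omega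
      simp only [List.getElem_map, List.getElem_zipIdx, List.getElem_zipWith, List.getElem_take,
        List.getElem_range, Nat.zero_add]
      rw [hZk]
      have hgd : rt.getD k 0 = rt[k]'(by omega) := List.getD_eq_getElem rt 0 (by omega)
      rw [hgd]
      exact pv_bxor_assoc (hnn _ (List.getElem_mem _)) (pvGf16Mul_nonneg _ _)
  -- last column
  · simp only [Nat.zero_add, List.zipWith_cons_cons, List.zipWith_nil_right,
      List.cons_append, List.nil_append]

-- the loop invariant: B's buffer is the not-yet-consumed message xored with A's register
theorem pv_inv (g : List Int) (n : Int) (N : Nat) (hN : 0 < N) (hn : n = (N : Int)) :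
    ∀ (ds rem : List Int), rem.length = N → (∀ x ∈ rem, 0 ≤ x) →
      ds.foldl (fun buf _ => pvEncStepB g n buf)
        (List.zipWith PySem.Int.bxor ((ds ++ List.replicate N 0).take N) rem
          ++ (ds ++ List.replicate N 0).drop N)
      = ds.foldl (pvEncStepA g n) rem := by
  obtain ⟨M, rfl⟩ : ∃ M, N = M + 1 := ⟨N - 1, by omega⟩
  intro ds
  induction ds with
  | nil =>
    intro rem hlen hnn
    simp only [List.nil_append, List.foldl_nil]
    rw [List.take_replicate, List.drop_replicate, Nat.min_self, Nat.sub_self]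
    rw [← hlen, pv_zip_zero_left]
    simp
  | cons d tl ih =>
    intro rem hlen hnn
    match rem with
    | r0 :: rt =>
      have hrt : rt.length = M := by simpa using hlen
      have hnn' : ∀ x ∈ rt, 0 ≤ x := fun x hx => hnn x (List.mem_cons_of_mem _ hx)
      have hr0 : 0 ≤ r0 := hnn r0 List.mem_cons_self
      simp only [List.cons_append, List.foldl_cons]
      rw [List.take_succ_cons, List.drop_succ_cons, List.zipWith_cons_cons]
      set q : List Int := tl ++ List.replicate (M + 1) 0 with hqdef
      have hql : (M + 1) ≤ q.length := by simp [hqdef]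
      set fb := PySem.Int.bxor d r0 with hfb
      -- M + 1 - 1 = M for the core lemma's statement
      have hsub : M + 1 - 1 = M := by omega
      have hstepB := pv_stepB_eq g n (M + 1) hn fb
        (List.zipWith PySem.Int.bxor (q.take M) rt ++ q.drop M)
      have hcore := pv_step_core g (M + 1) (by omega) q rt fb hql (by omega) hnn'
      rw [hsub] at hcore
      rw [List.cons_append, hstepB, hcore]
      -- the new register is exactly one A step
      have hstepA := pv_stepA_eq g n (M + 1) (by omega) hn (r0 :: rt) (by simpa using hrt) d
      rw [hsub] at hstepA
      simp only [List.getD_cons_succ, List.getD_cons_zero] at hstepA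
      rw [← hfb] at hstepA
      rw [← hstepA]
      -- apply the induction hypothesis
      have hlen' : (pvEncStepA g n (r0 :: rt) d).length = M + 1 := by
        rw [hstepA]
        simp
      have hnn'' : ∀ x ∈ pvEncStepA g n (r0 :: rt) d, 0 ≤ x := by
        rw [hstepA]
        intro x hx
        rcases List.mem_append.mp hx with hx | hx
        · obtain ⟨i, _, rfl⟩ := List.mem_map.mp hx
          apply pv_bxor_nonneg _ (pvGf16Mul_nonneg _ _)
          rcases Nat.lt_or_ge i rt.length with h | h
          · rw [List.getD_eq_getElem _ _ h]
            exact hnn' _ (List.getElem_mem _)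
          · simp [List.getD, List.getElem?_eq_none h]
        · simp only [List.mem_singleton] at hx
          subst hx
          exact pvGf16Mul_nonneg _ _
      exact ih (pvEncStepA g n (r0 :: rt) d) hlen' hnn''

theorem pv_init_eq (L : List Int) (N : Nat) (hL : N ≤ L.length) :
    List.zipWith PySem.Int.bxor (L.take N) (List.replicate N 0) ++ L.drop N = L := by
  have h1 : (L.take N).length = N := by simp; omega
  rw [show List.replicate N (0 : Int) = List.replicate (L.take N).length 0 from by rw [h1],
    pv_zip_zero_right, List.take_append_drop]

-- ===== VERDICT (by name: the statement is the Claim_ definition above) =====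
theorem gf16_rs_encode_py_spec : Claim_equal_gf16_rs_encode_py := by
  intro data n _ hPre
  unfold Spec_gf16_rs_encode_py
  rcases hPre with ⟨hPre1, -⟩
  cases data with
  | nil => simp [gf16_rs_encode_py, gf16_rs_encode_py_alt]
  | cons d tl =>
    have hn1 : 1 ≤ n := by
      rcases hPre1 with h | h
      · exact absurd h (by simp)
      · exact h
    have hn : n = ((n.toNat : Nat) : Int) := (Int.toNat_of_nonneg (by omega)).symm
    have hN : 0 < n.toNat := by omega
    show (d :: tl).foldl (pvEncStepA (pvBuildGen n) n) (List.replicate n.toNat 0)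
      = (d :: tl).foldl (fun buf _ => pvEncStepB (pvBuildGen n) n buf)
          ((d :: tl) ++ List.replicate n.toNat 0)
    have hinv := pv_inv (pvBuildGen n) n n.toNat hN hn (d :: tl)
      (List.replicate n.toNat 0) (by simp) (by simp)
    rw [pv_init_eq ((d :: tl) ++ List.replicate n.toNat 0) n.toNat (by simp; omega)] at hinv
    exact hinv.symm
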